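-- pv_equiv track=rewrite | github.com/mekkagodzilla/katas | max-sum-between-two-negatives.py | max_sum_between_two_negatives
-- ===== SOURCE A (Python) =====
-- def max_sum_between_two_negatives(arr):
--     candidates = []
--     negativeNumIndeces = []
--     for i in range(len(arr)):
--         if arr[i] < 0:
--             negativeNumIndeces.append(i)
--
--     for i in range(len(negativeNumIndeces) - 1):
--         sumToAppend = sum(arr[negativeNumIndeces[i] + 1 : negativeNumIndeces[i+1]])
--         candidates.append(sumToAppend)
--
--     if candidates:
--         return max(candidates)
--     return -1
-- ===== SOURCE B (Python) =====
-- def max_sum_between_two_negatives(arr):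
--     acc = 0
--     seen = False
--     best = None
--     for x in arr:
--         if x < 0:
--             if seen:
--                 best = acc if best is None else max(best, acc)
--             seen = True
--             acc = 0
--         else:
--             acc += x
--     return -1 if best is None else best
-- ===== Notes on version B (the rewrite author's own statement) =====
-- stated objective: alternative
-- what changed: Replaces A's two-pass approach (collect the list of negative indices, then build a list of slice sums between consecutive ones and take its max) by a single pass over arr keeping a running segment sum, a seen-a-negative flag and a running best.
import Mathlib
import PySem

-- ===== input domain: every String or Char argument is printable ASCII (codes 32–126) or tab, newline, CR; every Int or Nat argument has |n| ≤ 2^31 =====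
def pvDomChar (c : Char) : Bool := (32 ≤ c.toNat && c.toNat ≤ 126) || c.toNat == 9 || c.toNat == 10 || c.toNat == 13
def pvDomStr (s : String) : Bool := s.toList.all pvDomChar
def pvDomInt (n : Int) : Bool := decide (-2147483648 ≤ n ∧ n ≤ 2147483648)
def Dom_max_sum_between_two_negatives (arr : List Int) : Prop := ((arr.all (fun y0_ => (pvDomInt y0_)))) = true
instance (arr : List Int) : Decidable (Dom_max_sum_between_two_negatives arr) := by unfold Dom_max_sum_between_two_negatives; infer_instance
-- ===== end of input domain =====

-- B replaces A's two passes (collect negative indices, then max over slice sums between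
-- consecutive ones) by one pass with a running segment sum, a seen flag and a running best.

-- ===== PORT A =====
def max_sum_between_two_negatives (arr : List Int) : Int :=
  let negIdx : List Nat := (List.range arr.length).foldl
    (fun acc i => if arr.getD i 0 < 0 then acc ++ [i] else acc) []
  let candidates : List Int := (List.range (negIdx.length - 1)).foldl
    (fun c i =>
      c ++ [(PySem.List.slice arr (some ((negIdx.getD i 0 : Int) + 1))
              (some ((negIdx.getD (i + 1) 0 : Int)))).sum]) []
  match PySem.List.max? candidates (fun x => x) with
  | some m => m
  | none => -1

-- ===== PORT B =====
def altStep (s : Int × Bool × Option Int) (x : Int) : Int × Bool × Option Int :=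
  if x < 0 then
    (0, true, if s.2.1 then
        some (match s.2.2 with
              | none => s.1
              | some b => max b s.1)
      else s.2.2)
  else (s.1 + x, s.2.1, s.2.2)

def max_sum_between_two_negatives_alt (arr : List Int) : Int :=
  match (arr.foldl altStep (0, false, none)).2.2 with
  | some b => b
  | none => -1

-- ===== PRECONDITION & SPEC =====
def Spec_max_sum_between_two_negatives (arr : List Int) (out : Int) : Prop := out = max_sum_between_two_negatives_alt arr
instance (arr : List Int) (out : Int) : Decidable (Spec_max_sum_between_two_negatives arr out) := by unfold Spec_max_sum_between_two_negatives; infer_instance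

-- ===== CLAIM (what is proved, stated in full; the proofs are below) =====
def Claim_equal_max_sum_between_two_negatives : Prop := ∀ (arr : List Int), Dom_max_sum_between_two_negatives arr → Spec_max_sum_between_two_negatives arr (max_sum_between_two_negatives arr)

-- ===== LEMMAS AND PROOFS =====

-- indices of the negative entries (A's first loop, in filter form)
def negIdxOf (arr : List Int) : List Nat :=
  (List.range arr.length).filter (fun i => decide (arr.getD i 0 < 0))

-- sums of the segments strictly between consecutive negative positions (A's second loop)
def pairSums (arr : List Int) (ns : List Nat) : List Int :=
  (ns.zip ns.tail).map (fun p => ((arr.drop (p.1 + 1)).take (p.2 - (p.1 + 1))).sum)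

-- Python's `max(l)` / `-1` tail of A
def finM (l : List Int) : Int :=
  match PySem.List.max? l (fun x => x) with
  | some m => m
  | none => -1

-- reference recursion (B's loop, state split into three phases)
def refC3 (best acc : Int) : List Int → Int
  | [] => best
  | x :: xs => if x < 0 then refC3 (max best acc) 0 xs else refC3 best (acc + x) xs

def refC2 (acc : Int) : List Int → Int
  | [] => -1
  | x :: xs => if x < 0 then refC3 acc 0 xs else refC2 (acc + x) xs

def refC1 : List Int → Int
  | [] => -1
  | x :: xs => if x < 0 then refC2 0 xs else refC1 xs

-- candidates seen from a point where one negative has occurred, with `acc` the running prefix sum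
def cands (acc : Int) (xs : List Int) : List Int :=
  match negIdxOf xs with
  | [] => []
  | n0 :: _ => (acc + (xs.take n0).sum) :: pairSums xs (negIdxOf xs)

lemma negIdxOf_cons (x : Int) (xs : List Int) :
    negIdxOf (x :: xs) =
      if x < 0 then 0 :: (negIdxOf xs).map (· + 1) else (negIdxOf xs).map (· + 1) := by
  by_cases hx : x < 0 <;>
    simp [negIdxOf, List.range_succ_eq_map, List.filter_map,
      Function.comp_def, Nat.succ_eq_add_one, hx] <;>
    exact List.map_congr_left (fun a _ => rfl)

lemma pairSums_cons_map (x : Int) (arr : List Int) (ns : List Nat) :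
    pairSums (x :: arr) (ns.map (· + 1)) = pairSums arr ns := by
  simp only [pairSums]
  rw [show (ns.map (· + 1)).tail = ns.tail.map (· + 1) by cases ns <;> rfl,
      List.zip_map, List.map_map]
  refine List.map_congr_left (fun p _ => ?_)
  simp only [Function.comp_def, Prod.map]
  have h : p.2 + 1 - (p.1 + 1 + 1) = p.2 - (p.1 + 1) := by omega
  rw [h, List.drop_succ_cons]

lemma pairSums_zero_cons (arr : List Int) (a : Nat) (r : List Nat) :
    pairSums arr (0 :: a :: r) =
      ((arr.drop 1).take (a - 1)).sum :: pairSums arr (a :: r) := by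
  simp [pairSums, List.zip_cons_cons]

lemma rangeMap_pairs (f : Nat → Nat → Int) (ns : List Nat) :
    (List.range (ns.length - 1)).map (fun i => f (ns.getD i 0) (ns.getD (i + 1) 0)) =
      (ns.zip ns.tail).map (fun p => f p.1 p.2) := by
  induction ns with
  | nil => rfl
  | cons a t ih =>
    cases t with
    | nil => rfl
    | cons b u =>
      simp only [List.length_cons, Nat.add_sub_cancel, List.range_succ_eq_map, List.map_cons,
        List.map_map, List.getD_cons_zero, List.getD_cons_succ, List.zip_cons_cons, List.tail_cons]
      refine congrArg (f a b :: ·) ?_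
      have := ih
      simp only [List.length_cons, Nat.add_sub_cancel, List.tail_cons] at this
      rw [← this]
      rfl

lemma A_eq_finM (arr : List Int) :
    max_sum_between_two_negatives arr = finM (pairSums arr (negIdxOf arr)) := by
  have h1 := PySem.List.foldl_append_if (fun i => decide (arr.getD i 0 < 0)) (fun i => i)
    (List.range arr.length) []
  simp only [decide_eq_true_eq, List.nil_append, List.map_id'] at h1
  simp only [max_sum_between_two_negatives]
  rw [h1]
  rw [show ((List.range arr.length).filter fun i => decide (arr.getD i 0 < 0)) = negIdxOf arr
        from rfl]
  rw [PySem.List.foldl_append_singleton_eq_map, List.nil_append]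
  rw [rangeMap_pairs
    (fun i j => (PySem.List.slice arr (some ((i : Int) + 1)) (some (j : Int))).sum) (negIdxOf arr)]
  have hl : ((negIdxOf arr).zip (negIdxOf arr).tail).map
      (fun p => (PySem.List.slice arr (some ((p.1 : Int) + 1)) (some (p.2 : Int))).sum) =
      pairSums arr (negIdxOf arr) := by
    refine List.map_congr_left (fun p _ => ?_)
    rw [show ((p.1 : Int) + 1) = ((p.1 + 1 : Nat) : Int) by push_cast; ring,
        PySem.List.slice_natCast]
  rw [hl]
  rfl

lemma cands_nonneg (x : Int) (hx : ¬ x < 0) (acc : Int) (xs : List Int) :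
    cands acc (x :: xs) = cands (acc + x) xs := by
  simp only [cands, negIdxOf_cons, if_neg hx]
  cases h : negIdxOf xs with
  | nil => simp
  | cons n0 t =>
    simp only [List.map_cons]
    rw [show ((n0 + 1) :: t.map (· + 1)) = (n0 :: t).map (· + 1) from rfl, pairSums_cons_map,
        List.take_succ_cons, List.sum_cons, ← add_assoc]

lemma cands_neg (x : Int) (hx : x < 0) (acc : Int) (xs : List Int) :
    cands acc (x :: xs) = acc :: cands 0 xs := by
  simp only [cands, negIdxOf_cons, if_pos hx]
  cases h : negIdxOf xs with
  | nil => simp [pairSums]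
  | cons n0 t =>
    simp only [List.map_cons, List.take_zero, List.sum_nil, add_zero]
    rw [pairSums_zero_cons,
        show ((n0 + 1) :: t.map (· + 1)) = (n0 :: t).map (· + 1) from rfl, pairSums_cons_map]
    simp

lemma finM_cons (a : Int) (l : List Int) : finM (a :: l) = l.foldl max a := by
  simp [finM, PySem.List.max?_id_cons]

lemma refC3_eq (xs : List Int) : ∀ best acc : Int,
    refC3 best acc xs = (cands acc xs).foldl max best := by
  induction xs with
  | nil => intro best acc; simp [refC3, cands, negIdxOf]
  | cons x xs ih =>
    intro best acc
    by_cases hx : x < 0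
    · rw [cands_neg x hx, refC3, if_pos hx, ih, List.foldl_cons]
    · rw [cands_nonneg x hx, refC3, if_neg hx, ih]

lemma refC2_eq (xs : List Int) : ∀ acc : Int, refC2 acc xs = finM (cands acc xs) := by
  induction xs with
  | nil => intro acc; rfl
  | cons x xs ih =>
    intro acc
    by_cases hx : x < 0
    · rw [cands_neg x hx, refC2, if_pos hx, refC3_eq, finM_cons]
    · rw [cands_nonneg x hx, refC2, if_neg hx, ih]

lemma A_eq_refC1 (arr : List Int) : max_sum_between_two_negatives arr = refC1 arr := by
  induction arr with
  | nil => rfl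
  | cons x xs ih =>
    rw [A_eq_finM] at ih ⊢
    by_cases hx : x < 0
    · rw [refC1, if_pos hx, refC2_eq]
      refine congrArg finM ?_
      rw [negIdxOf_cons, if_pos hx]
      cases h : negIdxOf xs with
      | nil => simp [pairSums, cands, h]
      | cons n0 t =>
        simp only [List.map_cons]
        rw [pairSums_zero_cons,
            show ((n0 + 1) :: t.map (· + 1)) = (n0 :: t).map (· + 1) from rfl,
            pairSums_cons_map, ← h]
        simp [cands, h]
    · rw [refC1, if_neg hx, ← ih]
      refine congrArg finM ?_
      rw [negIdxOf_cons, if_neg hx, pairSums_cons_map]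

lemma foldB3 (xs : List Int) : ∀ best acc : Int,
    (xs.foldl altStep (acc, true, some best)).2.2 = some (refC3 best acc xs) := by
  induction xs with
  | nil => intro best acc; rfl
  | cons x xs ih =>
    intro best acc
    by_cases hx : x < 0 <;> simp [altStep, hx, refC3, ih]

lemma foldB2 (xs : List Int) : ∀ acc : Int,
    (match (xs.foldl altStep (acc, true, none)).2.2 with
     | some b => b | none => (-1 : Int)) = refC2 acc xs := by
  induction xs with
  | nil => intro acc; rfl
  | cons x xs ih =>
    intro acc
    by_cases hx : x < 0 <;> simp [altStep, hx, refC2, ih, foldB3]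

lemma foldB1 (xs : List Int) : ∀ acc : Int,
    (match (xs.foldl altStep (acc, false, none)).2.2 with
     | some b => b | none => (-1 : Int)) = refC1 xs := by
  induction xs with
  | nil => intro acc; rfl
  | cons x xs ih =>
    intro acc
    by_cases hx : x < 0 <;> simp [altStep, hx, refC1, ih, foldB2]

lemma B_eq_refC1 (arr : List Int) : max_sum_between_two_negatives_alt arr = refC1 arr := by
  simp only [max_sum_between_two_negatives_alt]
  exact foldB1 arr 0

-- ===== VERDICT (by name: the statement is the Claim_ definition above) =====
theorem max_sum_between_two_negatives_spec : Claim_equal_max_sum_between_two_negatives := by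
  intro arr _
  unfold Spec_max_sum_between_two_negatives
  rw [A_eq_refC1, B_eq_refC1]
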